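-- pv_equiv track=rewrite | github.com/andrewjmcgehee/Kattis | Python/htoo/htoo.py | convert_seq
-- ===== SOURCE A (Python) =====
-- def get_number(seq, i):
--   num = []
--   index = i
--   while index < len(seq):
--     # stop on first non number char
--     if not seq[index].isnumeric():
--       break
--     num.append(seq[index])
--     index += 1
--   num = int(''.join(num))
--   # need to know how far forard we moved in the sequence
--   return (num, index)
--
-- def convert_seq(seq, num_molecules):
--   res = []
--   i = 0
--   while i < len(seq):
--     # always on a single char
--     curr = seq[i]
--     if i+1 < len(seq) and seq[i+1].isnumeric():
--       # process number after atom
--       num_atoms, i = get_number(seq, i+1)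
--       res.append((curr, num_atoms * num_molecules))
--       continue
--     # no number following so we treat as if a 1 followed it
--     res.append((curr, num_molecules))
--     i += 1
--   return res
-- ===== SOURCE B (Python) =====
-- def convert_seq(seq, num_molecules):
--   # Split the sequence into maximal runs of numeric / non-numeric characters,
--   # then walk the runs: every character is an atom with count 1, except that the
--   # last character of a run absorbs a following numeric run as its count.
--   runs = []
--   i = 0
--   while i < len(seq):
--     j = i
--     while j < len(seq) and seq[j].isnumeric() == seq[i].isnumeric():
--       j += 1
--     runs.append((seq[i].isnumeric(), seq[i:j]))
--     i = j
--   res = []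
--   k = 0
--   while k < len(runs):
--     chars = runs[k][1]
--     if k + 1 < len(runs) and runs[k + 1][0]:
--       for ch in chars[:-1]:
--         res.append((ch, num_molecules))
--       res.append((chars[-1], int(runs[k + 1][1]) * num_molecules))
--       k += 2
--     else:
--       for ch in chars:
--         res.append((ch, num_molecules))
--       k += 1
--   return res
-- ===== Notes on version B (the rewrite author's own statement) =====
-- stated objective: alternative
-- what changed: Replaces A's index-walking while loop with an inner digit-collecting subloop by a segmentation of the string into maximal numeric/non-numeric runs followed by a walk over the run list, each run's last character absorbing a following numeric run as its count.
-- intended difference: On strings beginning with two or more numeric characters A treats the first digit as an atom whose count is the remaining digits of the leading run (e.g. '12' -> [('1', 2*m)]), which is accidental for a formula parser; B emits each leading digit as an ordinary single atom ([('1', m), ('2', m)]), the natural reading of an ill-formed leading numeric run. — e.g. on convert_seq("12", 1): A returns [("1", 2)], B returns [("1", 1), ("2", 1)]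
import Mathlib
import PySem

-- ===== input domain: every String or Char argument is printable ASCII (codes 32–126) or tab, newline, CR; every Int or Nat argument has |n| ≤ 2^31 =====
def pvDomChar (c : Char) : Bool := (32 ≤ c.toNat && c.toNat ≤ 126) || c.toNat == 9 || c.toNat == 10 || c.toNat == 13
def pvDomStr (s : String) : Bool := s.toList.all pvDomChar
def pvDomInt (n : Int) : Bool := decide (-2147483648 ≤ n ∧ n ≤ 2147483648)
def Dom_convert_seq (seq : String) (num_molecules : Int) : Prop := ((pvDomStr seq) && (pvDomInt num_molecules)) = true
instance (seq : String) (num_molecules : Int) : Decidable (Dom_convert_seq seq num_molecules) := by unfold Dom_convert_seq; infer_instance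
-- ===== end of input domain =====

-- B replaces A's index-walking while loop (with its inner digit-collecting subloop) by a
-- segmentation of the string into maximal numeric/non-numeric runs followed by a walk over
-- the run list; objective: alternative decomposition. On strings starting with two numeric
-- characters B intentionally differs from A (see D_convert_seq below).
-- While loops are realised as structural recursion on a fuel counter initialised to the
-- string length (a pure totality guard: fuel never runs out on any input).

-- ===== PORT A =====
-- str.isnumeric ported as PySem.Chars.isdigit: exact on the printable-ASCII + tab/newline/CR domain.
-- seq[index] after the bounds check is ported as seq.getD index ' ' (in range, so exact).
-- inner while loop of get_number (collects digit chars, advancing index)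
def getNumberLoop (seq : List Char) (fuel : Nat) (index : Nat) (num : List Char) : List Char × Nat :=
  match fuel with
  | 0 => (num, index)  -- unreachable: fuel starts at seq.length ≥ remaining iterations
  | fuel + 1 =>
    if index < seq.length then
      if ¬ (PySem.Chars.isdigit (seq.getD index ' ') = true) then (num, index)
      else getNumberLoop seq fuel (index + 1) (num ++ [seq.getD index ' '])
    else (num, index)

-- int(''.join(num)): num is nonempty digits at every call site, so int() cannot raise; .getD 0 unreachable
def get_number (seq : List Char) (i : Nat) : Int × Nat :=
  let p := getNumberLoop seq seq.length i []
  ((PySem.Int.ofChars? p.1).getD 0, p.2)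

def convertLoop (seq : List Char) (num_molecules : Int) (fuel : Nat) (i : Nat)
    (res : List (String × Int)) : List (String × Int) :=
  match fuel with
  | 0 => res  -- unreachable: fuel starts at seq.length ≥ remaining iterations
  | fuel + 1 =>
    if i < seq.length then
      let curr := seq.getD i ' '
      if i + 1 < seq.length ∧ PySem.Chars.isdigit (seq.getD (i+1) ' ') = true then
        let p := get_number seq (i + 1)
        convertLoop seq num_molecules fuel p.2 (res ++ [(String.mk [curr], p.1 * num_molecules)])
      else
        convertLoop seq num_molecules fuel (i + 1) (res ++ [(String.mk [curr], num_molecules)])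
    else res

def convert_seq (seq : String) (num_molecules : Int) : List (String × Int) :=
  convertLoop seq.toList num_molecules seq.toList.length 0 []

-- ===== PORT B =====
-- inner while loop of the segmentation: one maximal run of the same isdigit class per step
def runsFromF (fuel : Nat) (cs : List Char) : List (Bool × List Char) :=
  match fuel, cs with
  | _, [] => []
  | 0, _ => []  -- unreachable: fuel starts at cs.length ≥ number of runs
  | fuel + 1, c :: t =>
      let k := PySem.Chars.isdigit c
      (k, c :: t.takeWhile (fun x => PySem.Chars.isdigit x = k)) ::
        runsFromF fuel (t.dropWhile (fun x => PySem.Chars.isdigit x = k))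

def runsFrom (cs : List Char) : List (Bool × List Char) := runsFromF cs.length cs

-- the k-walk over the runs (port of Source B's second while loop)
def walkRuns (num_molecules : Int) : List (Bool × List Char) → List (String × Int)
  | [] => []
  | (_, r) :: (true, d) :: rest =>
      (r.dropLast.map (fun ch => (String.mk [ch], num_molecules))) ++
        ((String.mk [r.getLastD ' '], (PySem.Int.ofChars? d).getD 0 * num_molecules) ::
          walkRuns num_molecules rest)
  | (_, r) :: rest =>
      (r.map (fun ch => (String.mk [ch], num_molecules))) ++ walkRuns num_molecules rest

def convert_seq_alt (seq : String) (num_molecules : Int) : List (String × Int) :=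
  walkRuns num_molecules (runsFrom seq.toList)

-- ===== PRECONDITION & SPEC =====
-- On strings beginning with two or more numeric characters A treats the first digit as an
-- atom whose count is the remaining digits of the leading run (accidental for a formula
-- parser); B emits each leading digit as an ordinary single atom, the intended reading.
def D_convert_seq (seq : String) (num_molecules : Int) : Prop :=
  2 ≤ seq.toList.length ∧ ((seq.toList.take 2).all (fun c => PySem.Chars.isdigit c)) = true
instance (seq : String) (num_molecules : Int) : Decidable (D_convert_seq seq num_molecules) := by unfold D_convert_seq; infer_instance

def Spec_convert_seq (seq : String) (num_molecules : Int) (out : List (String × Int)) : Prop := ¬ D_convert_seq seq num_molecules → out = convert_seq_alt seq num_molecules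
instance (seq : String) (num_molecules : Int) (out : List (String × Int)) : Decidable (Spec_convert_seq seq num_molecules out) := by unfold Spec_convert_seq; infer_instance

def pvDiffWitness_convert_seq : String × Int := ("12", 1)
def pvDiffWitnessOut_convert_seq : (List (String × Int)) × (List (String × Int)) :=
  ([("1", 2)], [("1", 1), ("2", 1)])

-- ===== CLAIM (what is proved, stated in full; the proofs are below) =====
def Claim_unchanged_convert_seq : Prop := ∀ (seq : String) (num_molecules : Int), Dom_convert_seq seq num_molecules → Spec_convert_seq seq num_molecules (convert_seq seq num_molecules)
def Claim_changed_convert_seq : Prop := Dom_convert_seq (pvDiffWitness_convert_seq.1) (pvDiffWitness_convert_seq.2) ∧ D_convert_seq (pvDiffWitness_convert_seq.1) (pvDiffWitness_convert_seq.2) ∧ convert_seq (pvDiffWitness_convert_seq.1) (pvDiffWitness_convert_seq.2) = pvDiffWitnessOut_convert_seq.1 ∧ convert_seq_alt (pvDiffWitness_convert_seq.1) (pvDiffWitness_convert_seq.2) = pvDiffWitnessOut_convert_seq.2 ∧ pvDiffWitnessOut_convert_seq.1 ≠ pvDiffWitnessOut_convert_seq.2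
def Claim_exact_convert_seq : Prop := ∀ (seq : String) (num_molecules : Int), Dom_convert_seq seq num_molecules → D_convert_seq seq num_molecules → convert_seq seq num_molecules ≠ convert_seq_alt seq num_molecules

-- ===== LEMMAS AND PROOFS =====
-- canonical span-based recursion A's port is reduced to (fuelled, with its fuel irrelevance)
def convListF (m : Int) (fuel : Nat) : List Char → List (String × Int)
  | [] => []
  | c :: rest =>
      match fuel with
      | 0 => []
      | fuel + 1 =>
        if (rest.takeWhile (fun x => PySem.Chars.isdigit x)).isEmpty then
          (String.mk [c], m) :: convListF m fuel rest
        else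
          (String.mk [c],
            (PySem.Int.ofChars? (rest.takeWhile (fun x => PySem.Chars.isdigit x))).getD 0 * m) ::
            convListF m fuel (rest.dropWhile (fun x => PySem.Chars.isdigit x))

def convList (m : Int) (cs : List Char) : List (String × Int) := convListF m cs.length cs

theorem convListF_fuel (m : Int) : ∀ (fuel fuel' : Nat) (cs : List Char),
    cs.length ≤ fuel → cs.length ≤ fuel' → convListF m fuel cs = convListF m fuel' cs := by
  intro fuel
  induction fuel with
  | zero =>
      intro fuel' cs h _
      have : cs = [] := List.eq_nil_of_length_eq_zero (by omega)
      subst this; cases fuel' <;> simp [convListF]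
  | succ fuel ih =>
      intro fuel' cs h h'
      match cs with
      | [] => cases fuel' <;> simp [convListF]
      | c :: rest =>
        match fuel' with
        | 0 => simp at h'
        | fuel' + 1 =>
          simp only [convListF]
          have h1 : rest.length ≤ fuel := by simp at h; omega
          have h1' : rest.length ≤ fuel' := by simp at h'; omega
          have h2 : (rest.dropWhile (fun x => PySem.Chars.isdigit x)).length ≤ fuel := by
            have := List.length_dropWhile_le (fun x => PySem.Chars.isdigit x) rest; omega
          have h2' : (rest.dropWhile (fun x => PySem.Chars.isdigit x)).length ≤ fuel' := by
            have := List.length_dropWhile_le (fun x => PySem.Chars.isdigit x) rest; omega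
          rw [ih fuel' rest h1 h1', ih fuel' _ h2 h2']

theorem convList_nil (m : Int) : convList m [] = [] := rfl

theorem convList_cons (m : Int) (c : Char) (rest : List Char) :
    convList m (c :: rest) =
      if (rest.takeWhile (fun x => PySem.Chars.isdigit x)).isEmpty then
        (String.mk [c], m) :: convList m rest
      else
        (String.mk [c],
          (PySem.Int.ofChars? (rest.takeWhile (fun x => PySem.Chars.isdigit x))).getD 0 * m) ::
          convList m (rest.dropWhile (fun x => PySem.Chars.isdigit x)) := by
  show convListF m (rest.length + 1) (c :: rest) = _
  simp only [convListF]
  rw [convListF_fuel m rest.length rest.length rest le_rfl le_rfl]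
  rw [convListF_fuel m rest.length (rest.dropWhile (fun x => PySem.Chars.isdigit x)).length
        (rest.dropWhile (fun x => PySem.Chars.isdigit x))
        (List.length_dropWhile_le _ rest) le_rfl]
  rfl

theorem runsFromF_fuel : ∀ (fuel fuel' : Nat) (cs : List Char),
    cs.length ≤ fuel → cs.length ≤ fuel' → runsFromF fuel cs = runsFromF fuel' cs := by
  intro fuel
  induction fuel with
  | zero =>
      intro fuel' cs h _
      have : cs = [] := List.eq_nil_of_length_eq_zero (by omega)
      subst this; cases fuel' <;> simp [runsFromF]
  | succ fuel ih =>
      intro fuel' cs h h'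
      match cs with
      | [] => cases fuel' <;> simp [runsFromF]
      | c :: t =>
        match fuel' with
        | 0 => simp at h'
        | fuel' + 1 =>
          simp only [runsFromF]
          have hd : (t.dropWhile (fun x => PySem.Chars.isdigit x = PySem.Chars.isdigit c)).length ≤ fuel := by
            have := List.length_dropWhile_le (fun x => decide (PySem.Chars.isdigit x = PySem.Chars.isdigit c)) t
            simp at h; omega
          have hd' : (t.dropWhile (fun x => PySem.Chars.isdigit x = PySem.Chars.isdigit c)).length ≤ fuel' := by
            have := List.length_dropWhile_le (fun x => decide (PySem.Chars.isdigit x = PySem.Chars.isdigit c)) t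
            simp at h'; omega
          rw [ih fuel' _ hd hd']

theorem runsFrom_nil : runsFrom [] = [] := rfl

theorem runsFrom_cons (c : Char) (t : List Char) :
    runsFrom (c :: t) =
      (PySem.Chars.isdigit c,
        c :: t.takeWhile (fun x => PySem.Chars.isdigit x = PySem.Chars.isdigit c)) ::
        runsFrom (t.dropWhile (fun x => PySem.Chars.isdigit x = PySem.Chars.isdigit c)) := by
  show runsFromF (t.length + 1) (c :: t) = _
  simp only [runsFromF]
  rw [runsFromF_fuel t.length
        (t.dropWhile (fun x => PySem.Chars.isdigit x = PySem.Chars.isdigit c)).length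
        _ (by simpa using List.length_dropWhile_le _ t) le_rfl]
  rfl

theorem getNumberLoop_eq (seq : List Char) : ∀ (fuel index : Nat) (num : List Char),
    seq.length ≤ fuel + index →
    getNumberLoop seq fuel index num =
      (num ++ (seq.drop index).takeWhile (fun x => PySem.Chars.isdigit x),
       index + ((seq.drop index).takeWhile (fun x => PySem.Chars.isdigit x)).length) := by
  intro fuel
  induction fuel with
  | zero =>
      intro index num h
      have : seq.drop index = [] := List.drop_eq_nil_of_le (by omega)
      simp [getNumberLoop, this]
  | succ fuel ih =>
      intro index num h
      rw [getNumberLoop]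
      by_cases hlt : index < seq.length
      · have hget : seq.getD index ' ' = seq[index] := List.getD_eq_getElem seq ' ' hlt
        have hd : seq.drop index = seq[index] :: seq.drop (index + 1) := List.drop_eq_getElem_cons hlt
        by_cases hdig : PySem.Chars.isdigit seq[index] = true
        · rw [if_pos hlt, if_neg (by rw [hget]; simp [hdig])]
          rw [ih (index + 1) _ (by omega), hd]
          simp [List.takeWhile, hdig, List.append_assoc]
          exact ⟨by simp [List.getElem?_eq_getElem hlt], by omega⟩
        · have hdig' : PySem.Chars.isdigit seq[index] = false := by
            revert hdig; cases PySem.Chars.isdigit seq[index] <;> simp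
          rw [if_pos hlt, if_pos (by rw [hget]; simp [hdig'])]
          rw [hd]
          simp [List.takeWhile, hdig']
      · rw [if_neg hlt]
        have : seq.drop index = [] := List.drop_eq_nil_of_le (by omega)
        simp [this]

-- A's loop computes convList of the remaining suffix
theorem convertLoop_eq (seq : List Char) (m : Int) : ∀ (fuel i : Nat) (res : List (String × Int)),
    seq.length ≤ fuel + i →
    convertLoop seq m fuel i res = res ++ convList m (seq.drop i) := by
  intro fuel
  induction fuel with
  | zero =>
      intro i res h
      have : seq.drop i = [] := List.drop_eq_nil_of_le (by omega)
      simp [convertLoop, this, convList_nil]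
  | succ fuel ih =>
      intro i res h
      rw [convertLoop]
      by_cases hi : i < seq.length
      · have hgi : seq.getD i ' ' = seq[i] := List.getD_eq_getElem seq ' ' hi
        have hd1 : seq.drop i = seq[i] :: seq.drop (i + 1) := List.drop_eq_getElem_cons hi
        by_cases h2 : i + 1 < seq.length ∧ PySem.Chars.isdigit (seq.getD (i+1) ' ') = true
        · obtain ⟨hlt, hdig'⟩ := h2
          have hget : seq.getD (i+1) ' ' = seq[i+1] := List.getD_eq_getElem seq ' ' hlt
          have hdig : PySem.Chars.isdigit seq[i+1] = true := by rwa [hget] at hdig'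
          have hd2 : seq.drop (i + 1) = seq[i+1] :: seq.drop (i + 2) := List.drop_eq_getElem_cons hlt
          rw [if_pos hi, if_pos ⟨hlt, hdig'⟩]
          have hp : get_number seq (i+1) =
              ((PySem.Int.ofChars? ((seq.drop (i+1)).takeWhile (fun x => PySem.Chars.isdigit x))).getD 0,
               (i+1) + ((seq.drop (i+1)).takeWhile (fun x => PySem.Chars.isdigit x)).length) := by
            simp [get_number, getNumberLoop_eq seq seq.length (i+1) [] (by omega)]
          have hne : ((seq.drop (i+1)).takeWhile (fun x => PySem.Chars.isdigit x)).isEmpty = false := by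
            rw [hd2]; simp [List.takeWhile, hdig]
          have hdrop : seq.drop ((i+1) + ((seq.drop (i+1)).takeWhile (fun x => PySem.Chars.isdigit x)).length)
              = (seq.drop (i+1)).dropWhile (fun x => PySem.Chars.isdigit x) := by
            rw [← List.drop_drop]
            have hh := @List.drop_left Char ((seq.drop (i+1)).takeWhile (fun x => PySem.Chars.isdigit x))
              ((seq.drop (i+1)).dropWhile (fun x => PySem.Chars.isdigit x))
            rw [List.takeWhile_append_dropWhile] at hh
            exact hh
          rw [ih (get_number seq (i+1)).2 _ (by rw [hp]; omega)]
          conv_rhs => rw [hd1, convList_cons]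
          rw [if_neg (by rw [hne]; simp)]
          rw [hp, hdrop, hgi]
          simp [List.append_assoc]
        · rw [if_pos hi, if_neg h2]
          rw [ih (i + 1) _ (by omega)]
          have hemp : ((seq.drop (i+1)).takeWhile (fun x => PySem.Chars.isdigit x)).isEmpty = true := by
            by_cases hlt : i + 1 < seq.length
            · have hget : seq.getD (i+1) ' ' = seq[i+1] := List.getD_eq_getElem seq ' ' hlt
              have hd2 : seq.drop (i + 1) = seq[i+1] :: seq.drop (i + 2) := List.drop_eq_getElem_cons hlt
              have : PySem.Chars.isdigit seq[i+1] = false := by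
                by_contra hc
                exact h2 ⟨hlt, by rw [hget]; revert hc; cases PySem.Chars.isdigit seq[i+1] <;> simp⟩
              rw [hd2]; simp [List.takeWhile, this]
            · have : seq.drop (i+1) = [] := List.drop_eq_nil_of_le (by omega)
              simp [this]
          conv_rhs => rw [hd1, convList_cons]
          rw [if_pos hemp, hgi]
          simp [List.append_assoc]
      · rw [if_neg hi]
        have : seq.drop i = [] := List.drop_eq_nil_of_le (by omega)
        simp [this, convList_nil]

-- B's walk over the runs of a list whose head is not a digit computes convList
theorem walkRuns_runsFrom (m : Int) (n : Nat) (cs : List Char) (hn : cs.length ≤ n)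
    (hhd : ∀ c, cs.head? = some c → PySem.Chars.isdigit c = false) :
    walkRuns m (runsFrom cs) = convList m cs := by
  induction n generalizing cs with
  | zero =>
      have : cs = [] := List.eq_nil_of_length_eq_zero (by omega)
      subst this; simp [runsFrom_nil, walkRuns, convList_nil]
  | succ n ih =>
      match cs with
      | [] => simp [runsFrom_nil, walkRuns, convList_nil]
      | c :: t =>
        have hc : PySem.Chars.isdigit c = false := hhd c rfl
        rw [runsFrom_cons]
        simp only [hc]
        match ht : t with
        | [] =>
            simp [runsFrom_nil, walkRuns, convList_cons, convList_nil, List.takeWhile, List.dropWhile]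
        | c2 :: t2 =>
          by_cases hc2 : PySem.Chars.isdigit c2 = true
          · -- next char is a digit: run is [c], followed by a numeric run
            have htk : (c2 :: t2).takeWhile (fun x => PySem.Chars.isdigit x = false) = [] := by
              simp [List.takeWhile, hc2]
            have hdw : (c2 :: t2).dropWhile (fun x => PySem.Chars.isdigit x = false) = c2 :: t2 := by
              simp [List.dropWhile, hc2]
            rw [htk, hdw, runsFrom_cons]
            simp only [hc2]
            set ds := t2.takeWhile (fun x => PySem.Chars.isdigit x = true) with hds
            set rest := t2.dropWhile (fun x => PySem.Chars.isdigit x = true) with hrest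
            rw [walkRuns]
            have hds' : (c2 :: t2).takeWhile (fun x => PySem.Chars.isdigit x) = c2 :: ds := by
              simp [List.takeWhile, hc2, hds]
            have hdw' : (c2 :: t2).dropWhile (fun x => PySem.Chars.isdigit x) = rest := by
              simp [List.dropWhile, hc2, hrest]
            conv_rhs => rw [convList_cons]
            rw [if_neg (by simp [hds'])]
            rw [hds', hdw']
            have hrest_hd : ∀ c', rest.head? = some c' → PySem.Chars.isdigit c' = false := by
              intro c' hc'
              have := List.head?_dropWhile_not (fun x => decide (PySem.Chars.isdigit x = true)) t2
              rw [← hrest] at this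
              rw [hc'] at this
              simpa using this
            have hrlen : rest.length ≤ t2.length := List.length_dropWhile_le _ t2
            rw [ih rest (by simp at hn; omega) hrest_hd]
            simp [List.dropLast, List.getLastD]
          · -- next char is not a digit either: peel one char off the non-digit run
            have hc2' : PySem.Chars.isdigit c2 = false := by
              revert hc2; cases PySem.Chars.isdigit c2 <;> simp
            have htk : (c2 :: t2).takeWhile (fun x => PySem.Chars.isdigit x = false) =
                c2 :: t2.takeWhile (fun x => PySem.Chars.isdigit x = false) := by
              simp [List.takeWhile, hc2']
            have hdw : (c2 :: t2).dropWhile (fun x => PySem.Chars.isdigit x = false) =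
                t2.dropWhile (fun x => PySem.Chars.isdigit x = false) := by
              simp [List.dropWhile, hc2']
            rw [htk, hdw]
            have hIH : walkRuns m (runsFrom (c2 :: t2)) = convList m (c2 :: t2) :=
              ih (c2 :: t2) (by simp at hn ⊢; omega) (by intro c' h'; simp at h'; subst h'; exact hc2')
            rw [runsFrom_cons] at hIH
            simp only [hc2'] at hIH
            have hpeel : ∀ (r : List Char) (R : List (Bool × List Char)),
                walkRuns m ((false, c :: c2 :: r) :: R) =
                  (String.mk [c], m) :: walkRuns m ((false, c2 :: r) :: R) := by
              intro r R
              match R with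
              | [] => simp [walkRuns]
              | (true, d) :: R' => simp [walkRuns, List.dropLast, List.getLastD]
              | (false, d) :: R' => simp [walkRuns]
            rw [hpeel, hIH]
            conv_rhs => rw [convList_cons]
            rw [if_pos (by simp [List.takeWhile, hc2])]

-- B's walk on a list whose first run is followed by the runs of a non-digit-headed suffix
theorem walkRuns_cons_nondigit (m : Int) (b : Bool) (r : List Char) (cs : List Char)
    (hhd : ∀ c, cs.head? = some c → PySem.Chars.isdigit c = false) :
    walkRuns m ((b, r) :: runsFrom cs) =
      r.map (fun ch => (String.mk [ch], m)) ++ walkRuns m (runsFrom cs) := by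
  match cs with
  | [] => simp [runsFrom_nil, walkRuns]
  | a :: t =>
      rw [runsFrom_cons]
      have ha := hhd a rfl
      simp only [ha]
      simp [walkRuns]

-- ===== VERDICT (by name: the statements are the Claim_ definitions above) =====
theorem convert_seq_spec : Claim_unchanged_convert_seq := by
  intro seq m _ hnd
  show convert_seq seq m = convert_seq_alt seq m
  rw [convert_seq, convertLoop_eq seq.toList m seq.toList.length 0 [] (by omega), convert_seq_alt]
  simp only [List.drop_zero, List.nil_append]
  match hcs : seq.toList with
  | [] => simp [runsFrom_nil, walkRuns, convList_nil]
  | c :: t =>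
    by_cases hc : PySem.Chars.isdigit c = true
    · -- ¬D forces t = [] or head of t non-digit: the leading numeric run is just [c]
      have ht' : ∀ c2, t.head? = some c2 → PySem.Chars.isdigit c2 = false := by
        intro c2 h2
        by_contra hcc
        have hcc' : PySem.Chars.isdigit c2 = true := by
          revert hcc; cases PySem.Chars.isdigit c2 <;> simp
        apply hnd
        constructor
        · rw [hcs]; cases t with
          | nil => simp at h2
          | cons a t' => simp
        · rw [hcs]; cases t with
          | nil => simp at h2
          | cons a t' =>
              simp at h2; subst h2
              simp [List.take, hc, hcc']
      have htk : t.takeWhile (fun x => PySem.Chars.isdigit x = true) = [] := by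
        cases t with
        | nil => rfl
        | cons a t' =>
            have := ht' a rfl
            simp [List.takeWhile, this]
      have htk' : t.takeWhile (fun x => PySem.Chars.isdigit x) = [] := by
        simpa using htk
      have hdw : t.dropWhile (fun x => PySem.Chars.isdigit x = true) = t := by
        cases t with
        | nil => rfl
        | cons a t' =>
            have := ht' a rfl
            simp [List.dropWhile, this]
      rw [runsFrom_cons]
      simp only [hc, htk, hdw]
      have hwr : walkRuns m (runsFrom t) = convList m t :=
        walkRuns_runsFrom m t.length t le_rfl ht'
      rw [convList_cons, if_pos (by simp [htk'])]
      match hrt : runsFrom t with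
      | [] =>
          have htnil : t = [] := by
            cases t with
            | nil => rfl
            | cons a t' => rw [runsFrom_cons] at hrt; simp at hrt
          subst htnil
          simp [walkRuns, convList_nil]
      | (b, d) :: R =>
          have hb : b = false := by
            cases t with
            | nil => rw [runsFrom_nil] at hrt; exact absurd hrt (by simp)
            | cons a t' =>
                rw [runsFrom_cons] at hrt
                have ha := ht' a rfl
                simp [ha, List.cons.injEq] at hrt
                exact hrt.1.1
          subst hb
          rw [← hwr, hrt]
          simp [walkRuns]
    · have hc2 : PySem.Chars.isdigit c = false := by
        revert hc; cases PySem.Chars.isdigit c <;> simp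
      exact (walkRuns_runsFrom m (c :: t).length (c :: t) le_rfl
        (by intro c' h'; simp at h'; subst h'; exact hc2)).symm

theorem convert_seq_changed : Claim_changed_convert_seq := by
  unfold Claim_changed_convert_seq; decide

theorem convert_seq_tight : Claim_exact_convert_seq := by
  intro seq m _ hD
  obtain ⟨hlen, hall⟩ := hD
  rw [convert_seq, convertLoop_eq seq.toList m seq.toList.length 0 [] (by omega), convert_seq_alt]
  simp only [List.drop_zero, List.nil_append]
  match hcs : seq.toList with
  | [] => rw [hcs] at hlen; simp at hlen
  | [c] => rw [hcs] at hlen; simp at hlen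
  | c1 :: c2 :: t =>
    rw [hcs] at hall
    simp only [List.take, List.all_cons, List.all_nil, Bool.and_eq_true] at hall
    have h1 : PySem.Chars.isdigit c1 = true := hall.1
    have h2 : PySem.Chars.isdigit c2 = true := hall.2.1
    set ds := t.takeWhile (fun x => PySem.Chars.isdigit x = true) with hds
    set dw := t.dropWhile (fun x => PySem.Chars.isdigit x = true) with hdw
    have htkA : (c2 :: t).takeWhile (fun x => PySem.Chars.isdigit x) = c2 :: ds := by
      simp [List.takeWhile, h2, hds]
    have hdwA : (c2 :: t).dropWhile (fun x => PySem.Chars.isdigit x) = dw := by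
      simp [List.dropWhile, h2, hdw]
    have hdw_hd : ∀ c', dw.head? = some c' → PySem.Chars.isdigit c' = false := by
      intro c' hc'
      have := List.head?_dropWhile_not (fun x => decide (PySem.Chars.isdigit x = true)) t
      rw [← hdw] at this; rw [hc'] at this; simpa using this
    rw [convList_cons, if_neg (by simp [htkA])]
    rw [htkA, hdwA]
    rw [runsFrom_cons]
    simp only [h1]
    have htkB : (c2 :: t).takeWhile (fun x => PySem.Chars.isdigit x = true) = c2 :: ds := by
      simp [List.takeWhile, h2, hds]
    have hdwB : (c2 :: t).dropWhile (fun x => PySem.Chars.isdigit x = true) = dw := by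
      simp [List.dropWhile, h2, hdw]
    rw [htkB, hdwB]
    rw [walkRuns_cons_nondigit m true (c1 :: c2 :: ds) dw hdw_hd]
    rw [walkRuns_runsFrom m dw.length dw le_rfl hdw_hd]
    intro heq
    have hlen' := congrArg List.length heq
    simp at hlen'
    omega
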